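-- pv_equiv track=rewrite | github.com/NobuyukiInoue/LeetCode | Problems/1100-1199/1156_Swap_For_Longest_Repeated_Character_Substring/Project_Python3/Swap_For_Longest_Repeated_Character_Substring.py | maxRepOpt1
-- ===== SOURCE A (Python) =====
-- import collections
-- import itertools
--
-- def maxRepOpt1(text):
--     # 56ms
--     A = [[c, len(list(g))] for c, g in itertools.groupby(text)]
--     count = collections.Counter(text)
--     res = max(min(k + 1, count[c]) for c, k in A)
--     for i in range(1, len(A) - 1):
--         if A[i - 1][0] == A[i + 1][0] and A[i][1] == 1:
--             res = max(res, min(A[i - 1][1] + A[i + 1][1] + 1, count[A[i + 1][0]]))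
--     return res
-- ===== SOURCE B (Python) =====
-- import collections
--
-- def maxRepOpt1(text):
--     # Per-character one-pass scan: for each distinct character c, sweep text
--     # keeping cur = length of the current block of c's, prev = length of the
--     # previous block of c's if it is separated from the current position by
--     # exactly one non-c character; every c seen proposes min(prev+cur+1, count[c]).
--     # No run-length encoding is built. Returns 0 on "".
--     count = collections.Counter(text)
--     best = 0
--     for c in count:
--         prev = 0
--         cur = 0
--         adj = False
--         for ch in text:
--             if ch == c:
--                 cur += 1
--                 adj = True
--                 best = max(best, min(prev + cur + 1, count[c]))
--             else:
--                 prev = cur if adj else 0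
--                 cur = 0
--                 adj = False
--     return best
-- ===== Notes on version B (the rewrite author's own statement) =====
-- stated objective: alternative
-- what changed: B drops A's run-length grouping entirely: for each distinct character c it makes one prev/cur sweep over the text (prev = previous block of c separated by exactly one other character), maxing min(prev+cur+1, count[c]) at every c; A instead builds the groupby run list and merges adjacent runs by index.
import Mathlib
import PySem

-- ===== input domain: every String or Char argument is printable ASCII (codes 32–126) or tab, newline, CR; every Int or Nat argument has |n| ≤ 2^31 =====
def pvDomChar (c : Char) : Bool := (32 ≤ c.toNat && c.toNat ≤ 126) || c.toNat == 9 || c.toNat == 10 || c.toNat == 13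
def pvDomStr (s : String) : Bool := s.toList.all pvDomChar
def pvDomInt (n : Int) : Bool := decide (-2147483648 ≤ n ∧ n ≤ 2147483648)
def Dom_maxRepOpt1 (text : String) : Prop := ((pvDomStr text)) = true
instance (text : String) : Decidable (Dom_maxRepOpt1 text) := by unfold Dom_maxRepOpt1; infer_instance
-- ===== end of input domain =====

-- B replaces A's run-length grouping + merge loop by a per-distinct-character one-pass
-- prev/cur scan of the text (no run-length encoding is built); an alternative of similar cost.

-- ===== PORT A =====
-- itertools.groupby(text) rendered as [[c, len(list(g))] …]: take the maximal equal prefix, recurse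
def runsA (cs : List Char) : List (Char × Int) :=
  match cs with
  | [] => []
  | c :: rest =>
      (c, 1 + ((rest.takeWhile (· == c)).length : Int)) :: runsA (rest.dropWhile (· == c))
termination_by cs.length
decreasing_by
  have := List.length_dropWhile_le (· == c) rest
  simp
  omega

def maxRepOpt1 (text : String) : Int :=
  let A := runsA text.toList
  let count := PySem.Dict.counter text.toList
  -- max(...) over an empty generator raises ValueError: Pre_ excludes "", the .getD 0 is never taken there
  let res := (PySem.List.max? (A.map (fun p => min (p.2 + 1) (count.getD p.1 0))) (fun x => x)).getD 0
  (PySem.List.pyRange 1 ((A.length : Int) - 1) 1).foldl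
    (fun res i =>
      if (PySem.List.pyGetD A (i - 1) (' ', 0)).1 == (PySem.List.pyGetD A (i + 1) (' ', 0)).1
          && (PySem.List.pyGetD A i (' ', 0)).2 == 1 then
        max res (min ((PySem.List.pyGetD A (i - 1) (' ', 0)).2 + (PySem.List.pyGetD A (i + 1) (' ', 0)).2 + 1)
                     (count.getD (PySem.List.pyGetD A (i + 1) (' ', 0)).1 0))
      else res) res

-- ===== PORT B =====
-- Source B's inner loop body: state (prev, cur, adj, best)
def innerStep (cnt : Int) (c : Char) (st : Int × Int × Bool × Int) (ch : Char) : Int × Int × Bool × Int :=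
  if ch == c then (st.1, st.2.1 + 1, true, max st.2.2.2 (min (st.1 + (st.2.1 + 1) + 1) cnt))
  else ((if st.2.2.1 then st.2.1 else 0), 0, false, st.2.2.2)

def maxRepOpt1_alt (text : String) : Int :=
  let cs := text.toList
  let count := PySem.Dict.counter cs
  count.keys.foldl (fun best c =>
    (cs.foldl (innerStep (count.getD c 0) c) (0, 0, false, best)).2.2.2) 0

-- ===== PRECONDITION & SPEC =====
-- Pre_ excludes only the empty string, on which A's max() over an empty generator raises ValueError (B returns 0 there)
def Pre_maxRepOpt1 (text : String) : Prop := text ≠ ""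
instance (text : String) : Decidable (Pre_maxRepOpt1 text) := by unfold Pre_maxRepOpt1; infer_instance
def pvWitness_maxRepOpt1 : String := "aab baa"

def Spec_maxRepOpt1 (text : String) (out : Int) : Prop := out = maxRepOpt1_alt text
instance (text : String) (out : Int) : Decidable (Spec_maxRepOpt1 text out) := by unfold Spec_maxRepOpt1; infer_instance

-- ===== CLAIM (what is proved, stated in full; the proofs are below) =====
def Claim_equal_maxRepOpt1 : Prop := ∀ (text : String), Dom_maxRepOpt1 text → Pre_maxRepOpt1 text → Spec_maxRepOpt1 text (maxRepOpt1 text)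

-- ===== LEMMAS AND PROOFS =====

-- the list of adjacent run triples A's index loop inspects
def z3 (rs : List (Char × Int)) : List (((Char × Int) × (Char × Int)) × (Char × Int)) :=
  (rs.zip (rs.drop 1)).zip (rs.drop 2)

-- A's loop body, rephrased on a triple (using the first run's char, equal to the third's when the guard fires)
def Aloopstep (cnt : PySem.Dict Char Int) (b : Int) (w : ((Char × Int) × (Char × Int)) × (Char × Int)) : Int :=
  if w.1.1.1 == w.2.1 && w.1.2.2 == 1 then
    max b (min (w.1.1.2 + w.2.2 + 1) (cnt.getD w.1.1.1 0)) else b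

-- B's inner scan, one whole run at a time
def runStep (cnt : Int) (c : Char) (st : Int × Int × Bool × Int) (r : Char × Int) : Int × Int × Bool × Int :=
  if r.1 == c then (st.1, st.2.1 + r.2, true, max st.2.2.2 (min (st.1 + st.2.1 + r.2 + 1) cnt))
  else ((if r.2 == 1 && st.2.2.1 then st.2.1 else 0), 0, false, st.2.2.2)

-- the candidates B's scan for character c maxes over, read off the run list
def cands (cnt : Int) (c : Char) : List (Char × Int) → Int × Int × Bool → List Int
  | [], _ => []
  | r :: t, (p, u, a) =>
    if r.1 == c then min (p + u + r.2 + 1) cnt :: cands cnt c t (p, u + r.2, true)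
    else cands cnt c t ((if r.2 == 1 && a then u else 0), 0, false)

lemma cands_cons (cnt : Int) (c : Char) (r : Char × Int) (t : List (Char × Int)) (p u : Int) (a : Bool) :
    cands cnt c (r :: t) (p, u, a)
      = if r.1 == c then min (p + u + r.2 + 1) cnt :: cands cnt c t (p, u + r.2, true)
        else cands cnt c t ((if r.2 == 1 && a then u else 0), 0, false) := rfl

-- generic fold facts -------------------------------------------------------

lemma foldl_infl {α : Type} (g : Int → α → Int) (h : ∀ b a, b ≤ g b a) :
    ∀ (l : List α) (b : Int), b ≤ l.foldl g b := by
  intro l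
  induction l with
  | nil => simp
  | cons x t ih => intro b; exact le_trans (h b x) (ih _)

lemma foldl_ge_of_mem {α : Type} (g : Int → α → Int) (h : ∀ b a, b ≤ g b a)
    (x : Int) (a : α) (hx : ∀ b, x ≤ g b a) :
    ∀ (l : List α) (b : Int), a ∈ l → x ≤ l.foldl g b := by
  intro l
  induction l with
  | nil => simp
  | cons y t ih =>
    intro b hm
    rcases List.mem_cons.mp hm with rfl | hm
    · exact le_trans (hx b) (foldl_infl g h t _)
    · exact ih _ hm

lemma foldl_le {α : Type} (g : Int → α → Int) (X : Int)
    (l : List α) (hstep : ∀ b a, a ∈ l → b ≤ X → g b a ≤ X) :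
    ∀ b : Int, b ≤ X → l.foldl g b ≤ X := by
  induction l with
  | nil => simp
  | cons x t ih =>
    intro b hb
    exact ih (fun b a ha => hstep b a (List.mem_cons_of_mem _ ha)) _
      (hstep b x (List.mem_cons_self ..) hb)

lemma foldlMax_infl (l : List Int) (b : Int) : b ≤ l.foldl max b :=
  foldl_infl max (fun b a => le_max_left b a) l b

lemma le_foldlMax_of_mem {x : Int} {l : List Int} (hx : x ∈ l) (b : Int) :
    x ≤ l.foldl max b :=
  foldl_ge_of_mem max (fun b a => le_max_left b a) x x (fun b => le_max_right b x) l b hx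

-- structure of runsA -------------------------------------------------------

-- every run has length ≥ 1 and its character occurs in the source
lemma runsA_mem (cs : List Char) : ∀ p ∈ runsA cs, 1 ≤ p.2 ∧ p.1 ∈ cs := by
  induction hn : cs.length using Nat.strong_induction_on generalizing cs with
  | _ n ih =>
  match cs with
  | [] => simp [runsA]
  | c :: rest =>
    intro p hp
    rw [runsA] at hp
    rcases List.mem_cons.mp hp with h | h
    · subst h
      constructor
      · have : (0 : Int) ≤ ((rest.takeWhile (· == c)).length : Int) := by positivity
        omega
      · simp
    · have hlt : (rest.dropWhile (· == c)).length < n := by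
        have := List.length_dropWhile_le (· == c) rest
        simp at hn
        omega
      have := ih _ hlt _ rfl p h
      refine ⟨this.1, ?_⟩
      have hsub : rest.dropWhile (· == c) ⊆ rest := (List.dropWhile_sublist _).subset
      exact List.mem_cons_of_mem _ (hsub this.2)

-- adjacent runs carry distinct characters
lemma runsA_chain (cs : List Char) :
    List.IsChain (fun p q : Char × Int => p.1 ≠ q.1) (runsA cs) := by
  induction hn : cs.length using Nat.strong_induction_on generalizing cs with
  | _ n ih =>
  match cs with
  | [] => simp [runsA]
  | c :: rest =>
    rw [runsA]
    have hlt : (rest.dropWhile (· == c)).length < n := by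
      have := List.length_dropWhile_le (· == c) rest
      simp at hn
      omega
    have htail := ih _ hlt _ rfl
    match hd : rest.dropWhile (· == c) with
    | [] => simp [runsA]
    | e :: rest' =>
      have he : ¬ (e == c) = true := by
        have hw := List.head?_dropWhile_not (· == c) rest
        rw [hd] at hw
        simpa using hw
      rw [hd] at htail
      rw [runsA] at htail ⊢
      exact List.isChain_cons_cons.mpr ⟨by simpa using fun h => he (by simp [h]), htail⟩

-- A's index loop over range(1, len-1) is the fold of Aloopstep over z3
lemma loops_eq (rs : List (Char × Int)) (cnt : PySem.Dict Char Int) (r : Int) :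
    (PySem.List.pyRange 1 ((rs.length : Int) - 1) 1).foldl
      (fun res i =>
        if (PySem.List.pyGetD rs (i - 1) (' ', 0)).1 == (PySem.List.pyGetD rs (i + 1) (' ', 0)).1
            && (PySem.List.pyGetD rs i (' ', 0)).2 == 1 then
          max res (min ((PySem.List.pyGetD rs (i - 1) (' ', 0)).2 + (PySem.List.pyGetD rs (i + 1) (' ', 0)).2 + 1)
                       (cnt.getD (PySem.List.pyGetD rs (i + 1) (' ', 0)).1 0))
        else res) r
    = (z3 rs).foldl (Aloopstep cnt) r := by
  show _ = ((rs.zip (rs.drop 1)).zip (rs.drop 2)).foldl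
      (fun res t =>
        if t.1.1.1 == t.2.1 && t.1.2.2 == 1 then
          max res (min (t.1.1.2 + t.2.2 + 1) (cnt.getD t.1.1.1 0))
        else res) r
  have htr : (rs.zip (rs.drop 1)).zip (rs.drop 2)
      = (List.range (rs.length - 2)).map
          (fun j => ((rs.getD j (' ', 0), rs.getD (j + 1) (' ', 0)), rs.getD (j + 2) (' ', 0))) := by
    apply List.ext_getElem
    · simp
      omega
    · intro i h1 h2
      have hi : i < rs.length - 2 := by simpa using h2
      simp [List.getElem_zip, List.getElem_drop, Nat.add_comm]
      refine ⟨⟨?_, ?_⟩, ?_⟩ <;> rw [List.getElem?_eq_getElem (by omega)] <;> simp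
  rw [htr, PySem.List.pyRange_one]
  have hcast : (((rs.length : Int) - 1) - 1).toNat = rs.length - 2 := by omega
  rw [hcast, List.foldl_map, List.foldl_map]
  apply PySem.List.foldl_congr_mem
  intro acc j hj
  have e1 : (1 : Int) + (j : Int) - 1 = ((j : Nat) : Int) := by omega
  have e2 : (1 : Int) + (j : Int) + 1 = (((j + 2 : Nat)) : Int) := by push_cast; omega
  have e3 : (1 : Int) + (j : Int) = (((j + 1 : Nat)) : Int) := by push_cast; omega
  rw [e1, e2, e3]
  simp only [PySem.List.pyGetD_natCast]
  by_cases hc : ((rs.getD j (' ', 0)).1 == (rs.getD (j + 2) (' ', 0)).1 && (rs.getD (j + 1) (' ', 0)).2 == 1) = true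
  · have hch : (rs.getD j (' ', 0)).1 = (rs.getD (j + 2) (' ', 0)).1 :=
      eq_of_beq ((Bool.and_eq_true ..).mp hc).1
    simp only [hch]
  · simp only [hc]
    simp

-- B's character scan processes one run at a time ---------------------------

lemma scan_c_block (cnt : Int) (c : Char) :
    ∀ (u : List Char), (∀ x ∈ u, x = c) → u ≠ [] →
      ∀ p q a b, u.foldl (innerStep cnt c) (p, q, a, b)
        = (p, q + (u.length : Int), true, max b (min (p + q + (u.length : Int) + 1) cnt)) := by
  intro u
  induction u with
  | nil => intro _ hne; exact absurd rfl hne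
  | cons x t ih =>
    intro hall _ p q a b
    have hx : (x == c) = true := by simp [hall x (by simp)]
    have hstep : ∀ (st : Int × Int × Bool × Int),
        innerStep cnt c st x = (st.1, st.2.1 + 1, true, max st.2.2.2 (min (st.1 + (st.2.1 + 1) + 1) cnt)) := by
      intro st; simp [innerStep, hx]
    rw [List.foldl_cons, hstep]
    match t with
    | [] =>
      simp only [List.foldl_nil, List.length_cons, List.length_nil, Prod.mk.injEq]
      refine ⟨trivial, by push_cast; omega, trivial, by push_cast; omega⟩
    | y :: t' =>
      rw [ih (fun z hz => hall z (by simp [hz])) (by simp)]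
      simp only [Prod.mk.injEq, List.length_cons]
      refine ⟨trivial, by push_cast; omega, trivial, by push_cast; omega⟩

lemma scan_nonc_block (cnt : Int) (c : Char) :
    ∀ (u : List Char), (∀ x ∈ u, x ≠ c) → u ≠ [] →
      ∀ p q a b, u.foldl (innerStep cnt c) (p, q, a, b)
        = ((if u.length == 1 && a then q else 0), 0, false, b) := by
  intro u
  induction u with
  | nil => intro _ hne; exact absurd rfl hne
  | cons x t ih =>
    intro hall _ p q a b
    have hx : (x == c) = false := beq_eq_false_iff_ne.mpr (hall x (by simp))
    have hstep : ∀ (st : Int × Int × Bool × Int),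
        innerStep cnt c st x = ((if st.2.2.1 then st.2.1 else 0), 0, false, st.2.2.2) := by
      intro st; simp [innerStep, hx]
    rw [List.foldl_cons, hstep]
    match t with
    | [] => simp
    | y :: t' =>
      rw [ih (fun z hz => hall z (by simp [hz])) (by simp)]
      simp

lemma scan_runs (cnt : Int) (c : Char) (cs : List Char) :
    ∀ st, cs.foldl (innerStep cnt c) st = (runsA cs).foldl (runStep cnt c) st := by
  induction hn : cs.length using Nat.strong_induction_on generalizing cs with
  | _ n ih =>
  match cs with
  | [] => intro st; simp [runsA]
  | d :: rest =>
    intro st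
    obtain ⟨p, q, a, b⟩ := st
    have hsplit : rest = rest.takeWhile (· == d) ++ rest.dropWhile (· == d) :=
      (List.takeWhile_append_dropWhile).symm
    have hblock : d :: rest = (d :: rest.takeWhile (· == d)) ++ rest.dropWhile (· == d) := by
      conv_lhs => rw [hsplit]
      simp
    conv_lhs => rw [hblock]
    rw [List.foldl_append]
    conv_rhs => rw [runsA, List.foldl_cons]
    have hlt : (rest.dropWhile (· == d)).length < n := by
      have := List.length_dropWhile_le (· == d) rest
      simp at hn
      omega
    rw [← ih _ hlt _ rfl]
    congr 1
    by_cases hdc : (d == c) = true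
    · have hd : d = c := eq_of_beq hdc
      rw [scan_c_block cnt c _ (fun x hx => by
          rcases List.mem_cons.mp hx with rfl | hx
          · exact hd
          · have := List.mem_takeWhile_imp hx
            simp at this
            rw [this, hd]) (by simp)]
      have hstep : runStep cnt c (p, q, a, b) (d, 1 + ((rest.takeWhile (· == d)).length : Int))
          = (p, q + (1 + ((rest.takeWhile (· == d)).length : Int)), true,
             max b (min (p + q + (1 + ((rest.takeWhile (· == d)).length : Int)) + 1) cnt)) := by
        simp [runStep, hdc]
      rw [hstep]
      simp only [List.length_cons, Prod.mk.injEq]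
      and_intros <;> first | trivial | (push_cast; omega)
    · have hd : (d == c) = false := by simpa using hdc
      rw [scan_nonc_block cnt c _ (fun x hx => by
          rcases List.mem_cons.mp hx with rfl | hx
          · simpa using hd
          · have := List.mem_takeWhile_imp hx
            simp at this
            rw [this]
            simpa using hd) (by simp)]
      have hstep : runStep cnt c (p, q, a, b) (d, 1 + ((rest.takeWhile (· == d)).length : Int))
          = ((if (1 + ((rest.takeWhile (· == d)).length : Int)) == 1 && a then q else 0), 0, false, b) := by
        simp [runStep, hd]
      rw [hstep]
      simp only [List.length_cons, Prod.mk.injEq]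
      and_intros <;> try trivial
      by_cases htw : (rest.takeWhile (· == d)).length = 0
      · simp [htw]
      · have h1 : (((rest.takeWhile (· == d)).length + 1 : Nat) == 1) = false := by
          rw [beq_eq_false_iff_ne]
          omega
        have h2 : ((1 + ((rest.takeWhile (· == d)).length : Int)) == 1) = false := by
          rw [beq_eq_false_iff_ne]
          intro h
          omega
        simp only [h1, h2]

lemma runfold_best (cnt : Int) (c : Char) :
    ∀ (rs : List (Char × Int)) p u a b,
      ((rs.foldl (runStep cnt c) (p, u, a, b)).2.2.2) = (cands cnt c rs (p, u, a)).foldl max b := by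
  intro rs
  induction rs with
  | nil => intro p u a b; simp [cands]
  | cons r t ih =>
    intro p u a b
    by_cases hrc : (r.1 == c) = true
    · have hstep : runStep cnt c (p, u, a, b) r
          = (p, u + r.2, true, max b (min (p + u + r.2 + 1) cnt)) := by
        simp [runStep, hrc]
      have hcs : cands cnt c (r :: t) (p, u, a)
          = min (p + u + r.2 + 1) cnt :: cands cnt c t (p, u + r.2, true) := by
        simp [cands, hrc]
      rw [List.foldl_cons, hstep, hcs, List.foldl_cons]
      exact ih p (u + r.2) true (max b (min (p + u + r.2 + 1) cnt))
    · have hrc' : (r.1 == c) = false := by simpa using hrc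
      have hstep : runStep cnt c (p, u, a, b) r
          = ((if r.2 == 1 && a then u else 0), 0, false, b) := by
        simp [runStep, hrc']
      have hcs : cands cnt c (r :: t) (p, u, a)
          = cands cnt c t ((if r.2 == 1 && a then u else 0), 0, false) := by
        simp [cands, hrc']
      rw [List.foldl_cons, hstep, hcs]
      exact ih _ 0 false b

-- z3 structure -------------------------------------------------------------

lemma z3_cons3 (x y z : Char × Int) (t : List (Char × Int)) :
    z3 (x :: y :: z :: t) = ((x, y), z) :: z3 (y :: z :: t) := by
  simp [z3]

lemma mem_z3_cons {w : ((Char × Int) × (Char × Int)) × (Char × Int)} {l : List (Char × Int)}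
    (x : Char × Int) (h : w ∈ z3 l) : w ∈ z3 (x :: l) := by
  match l with
  | [] => simp [z3] at h
  | [a] => simp [z3] at h
  | [a, b] => simp [z3] at h
  | a :: b :: c :: t => rw [z3_cons3]; exact List.mem_cons_of_mem _ h

lemma mem_z3_suffix {w : ((Char × Int) × (Char × Int)) × (Char × Int)}
    {t rs : List (Char × Int)} (hs : t <:+ rs) (h : w ∈ z3 t) : w ∈ z3 rs := by
  obtain ⟨l1, rfl⟩ := hs
  induction l1 with
  | nil => simpa using h
  | cons x l1 ih => exact mem_z3_cons x ih

-- the candidate-list lemmas -----------------------------------------------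

-- every run candidate min(k+1, cnt) is dominated by some candidate of B's scan for its character
lemma exists_cand_run (cnt : Int) (c : Char) :
    ∀ (t : List (Char × Int)) p u a, 0 ≤ p → 0 ≤ u → (∀ r ∈ t, 1 ≤ r.2) →
      ∀ k, (c, k) ∈ t → ∃ y ∈ cands cnt c t (p, u, a), min (k + 1) cnt ≤ y := by
  intro t
  induction t with
  | nil => simp
  | cons r t' ih =>
    intro p u a hp hu hpos k hm
    rcases List.mem_cons.mp hm with heq | hm'
    · have hrc : (r.1 == c) = true := by rw [← heq]; simp
      refine ⟨min (p + u + r.2 + 1) cnt, ?_, ?_⟩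
      · simp [cands, hrc]
      · have hk : r.2 = k := by rw [← heq]
        rw [hk]
        omega
    · by_cases hrc : (r.1 == c) = true
      · have hr2 : 1 ≤ r.2 := hpos r (by simp)
        obtain ⟨y, hy, hle⟩ := ih p (u + r.2) true hp (by omega)
          (fun s hs => hpos s (by simp [hs])) k hm'
        have hcs : cands cnt c (r :: t') (p, u, a)
            = min (p + u + r.2 + 1) cnt :: cands cnt c t' (p, u + r.2, true) := by
          simp only [cands, hrc]
          simp
        exact ⟨y, by rw [hcs]; exact List.mem_cons_of_mem _ hy, hle⟩
      · have hrc' : (r.1 == c) = false := by simpa using hrc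
        obtain ⟨y, hy, hle⟩ := ih (if r.2 == 1 && a then u else 0) 0 false
          (by split <;> omega) le_rfl (fun s hs => hpos s (by simp [hs])) k hm'
        have hcs : cands cnt c (r :: t') (p, u, a)
            = cands cnt c t' ((if r.2 == 1 && a then u else 0), 0, false) := by
          simp only [cands, hrc']
          simp
        exact ⟨y, by rw [hcs]; exact hy, hle⟩

-- every merge candidate is dominated by some candidate of B's scan for its character
lemma exists_cand_trip (cnt : Int) (c : Char) :
    ∀ (t : List (Char × Int)) p u a, 0 ≤ p → 0 ≤ u → (∀ r ∈ t, 1 ≤ r.2) →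
      List.IsChain (fun p q : Char × Int => p.1 ≠ q.1) t →
      ∀ k1 e k3, (((c, k1), (e, 1)), (c, k3)) ∈ z3 t →
        ∃ y ∈ cands cnt c t (p, u, a), min (k1 + k3 + 1) cnt ≤ y := by
  intro t
  induction t with
  | nil => intro p u a _ _ _ _ k1 e k3 hm; simp [z3] at hm
  | cons x t' ih =>
    intro p u a hp hu hpos hch k1 e k3 hm
    match t' with
    | [] => simp [z3] at hm
    | [y] => simp [z3] at hm
    | y :: z :: t3 =>
      rw [z3_cons3] at hm
      rcases List.mem_cons.mp hm with heq | hm'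
      · have hx : x = (c, k1) := (congrArg (fun w => w.1.1) heq).symm
        have hy : y = (e, 1) := (congrArg (fun w => w.1.2) heq).symm
        have hz : z = (c, k3) := (congrArg (fun w => w.2) heq).symm
        subst hx hy hz
        have hec : (e == c) = false := by
          have h := (List.isChain_cons_cons.mp hch).1
          exact beq_eq_false_iff_ne.mpr (fun hh => h (by simp [hh]))
        refine ⟨min ((u + k1) + 0 + k3 + 1) cnt, ?_, by omega⟩
        have h1 : cands cnt c ((c, k1) :: (e, 1) :: (c, k3) :: t3) (p, u, a)
            = min (p + u + k1 + 1) cnt :: cands cnt c ((e, 1) :: (c, k3) :: t3) (p, u + k1, true) := by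
          rw [cands_cons, if_pos (by simp)]
        have h2 : cands cnt c ((e, 1) :: (c, k3) :: t3) (p, u + k1, true)
            = cands cnt c ((c, k3) :: t3) (u + k1, 0, false) := by
          rw [cands_cons, if_neg (by simp [hec]), if_pos (by simp)]
        have h3 : cands cnt c ((c, k3) :: t3) (u + k1, 0, false)
            = min ((u + k1) + 0 + k3 + 1) cnt :: cands cnt c t3 (u + k1, 0 + k3, true) := by
          rw [cands_cons, if_pos (by simp)]
        rw [h1, h2, h3]
        simp
      · have hch' := hch.suffix (List.suffix_cons x _)
        have hpos' : ∀ s ∈ y :: z :: t3, 1 ≤ s.2 := fun s hs => hpos s (by simp [hs])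
        by_cases hxc : (x.1 == c) = true
        · have hx2 : 1 ≤ x.2 := hpos x (by simp)
          obtain ⟨w, hw, hle⟩ := ih p (u + x.2) true hp (by omega) hpos' hch' k1 e k3 hm'
          have hcs : cands cnt c (x :: y :: z :: t3) (p, u, a)
              = min (p + u + x.2 + 1) cnt :: cands cnt c (y :: z :: t3) (p, u + x.2, true) := by
            simp only [cands, hxc]
            simp
          exact ⟨w, by rw [hcs]; exact List.mem_cons_of_mem _ hw, hle⟩
        · have hxc' : (x.1 == c) = false := by simpa using hxc
          obtain ⟨w, hw, hle⟩ := ih (if x.2 == 1 && a then u else 0) 0 false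
            (by split <;> omega) le_rfl hpos' hch' k1 e k3 hm'
          have hcs : cands cnt c (x :: y :: z :: t3) (p, u, a)
              = cands cnt c (y :: z :: t3) ((if x.2 == 1 && a then u else 0), 0, false) := by
            simp only [cands, hxc']
            simp
          exact ⟨w, by rw [hcs]; exact hw, hle⟩

-- every candidate of B's scan is bounded by A's result R, given the run/triple bounds on R
lemma cands_bound (cnt : Int) (c : Char) (R : Int) (rs : List (Char × Int))
    (Hrun : ∀ k, (c, k) ∈ rs → min (k + 1) cnt ≤ R)
    (Htrip : ∀ k1 e k3, (((c, k1), (e, 1)), (c, k3)) ∈ z3 rs → min (k1 + k3 + 1) cnt ≤ R)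
    (Hpos : ∀ r ∈ rs, 1 ≤ r.2)
    (Hch : List.IsChain (fun p q : Char × Int => p.1 ≠ q.1) rs) :
    ∀ (t : List (Char × Int)), t <:+ rs → ∀ p u a, 0 ≤ p → 0 ≤ u →
      (∀ k t', t = (c, k) :: t' → u = 0 ∧ min (p + k + 1) cnt ≤ R) →
      (∀ e m k t', t = (e, m) :: (c, k) :: t' → a = true → m = 1 → min (u + k + 1) cnt ≤ R) →
      ∀ x ∈ cands cnt c t (p, u, a), x ≤ R := by
  intro t
  induction t with
  | nil => intro _ p u a _ _ _ _ x hx; simp [cands] at hx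
  | cons r t' ih =>
    intro hsuf p u a hp hu H2 H3 x hx
    obtain ⟨d, k⟩ := r
    have hsuf' : t' <:+ rs := (List.suffix_cons (d, k) t').trans hsuf
    have hmem : (d, k) ∈ rs := hsuf.subset (by simp)
    have hk1 : 1 ≤ k := Hpos _ hmem
    by_cases hdc : (d == c) = true
    · have hd : d = c := eq_of_beq hdc
      subst hd
      obtain ⟨hu0, hR⟩ := H2 k t' rfl
      subst hu0
      rw [cands_cons, if_pos (by simp)] at hx
      rcases List.mem_cons.mp hx with rfl | hx'
      · simpa using hR
      · refine ih hsuf' p (0 + k) true hp (by omega) ?_ ?_ x hx'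
        · intro k' t'' heq
          exfalso
          have hch := Hch.suffix hsuf
          rw [heq] at hch
          exact (List.isChain_cons_cons.mp hch).1 rfl
        · intro e m k3 t'' heq _ hm1
          subst hm1
          have htr : (((d, k), (e, 1)), (d, k3)) ∈ z3 ((d, k) :: t') := by
            rw [heq, z3_cons3]
            simp
          have := Htrip k e k3 (mem_z3_suffix hsuf htr)
          simpa using this
    · have hdc' : (d == c) = false := by simpa using hdc
      rw [cands_cons, if_neg (by simp [hdc'])] at hx
      refine ih hsuf' _ 0 false (by split <;> omega) le_rfl ?_ ?_ x hx
      · intro k' t'' heq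
        refine ⟨rfl, ?_⟩
        by_cases hma : ((k : Int) == 1 && a) = true
        · have hk1' : k = 1 := by
            have := (Bool.and_eq_true ..).mp hma
            exact eq_of_beq this.1
          have ha : a = true := ((Bool.and_eq_true ..).mp hma).2
          have := H3 d k k' t'' (by rw [heq]) ha hk1'
          rw [if_pos hma]
          simpa using this
        · have hma' : ((k : Int) == 1 && a) = false := by simpa using hma
          have hmem' : (c, k') ∈ rs := hsuf.subset (by rw [heq]; simp)
          have := Hrun k' hmem'
          rw [if_neg (by simp [hma'])]
          simpa using this
      · intro _ _ _ _ _ hfa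
        exact absurd hfa (by simp)

-- the two folds agree on any nonempty run list with the required structure
lemma AB_eq (count : PySem.Dict Char Int) (r0 : Char × Int) (rt : List (Char × Int))
    (hposr : ∀ r ∈ r0 :: rt, 1 ≤ r.2)
    (hkeys : ∀ r ∈ r0 :: rt, r.1 ∈ count.keys)
    (hcnt0 : ∀ ch : Char, 0 ≤ count.getD ch 0)
    (hchain : List.IsChain (fun p q : Char × Int => p.1 ≠ q.1) (r0 :: rt)) :
    (z3 (r0 :: rt)).foldl (Aloopstep count)
      ((PySem.List.max? ((r0 :: rt).map (fun p => min (p.2 + 1) (count.getD p.1 0))) (fun x => x)).getD 0)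
    = count.keys.foldl
        (fun best c => (cands (count.getD c 0) c (r0 :: rt) (0, 0, false)).foldl max best) 0 := by
  rw [List.map_cons, PySem.List.max?_id_cons, Option.getD_some]
  have inflA : ∀ (b : Int) w, b ≤ Aloopstep count b w := by
    intro b w
    unfold Aloopstep
    split
    · exact le_max_left _ _
    · exact le_rfl
  have hrun_le_RES : ∀ r ∈ r0 :: rt,
      min (r.2 + 1) (count.getD r.1 0)
        ≤ (rt.map (fun p => min (p.2 + 1) (count.getD p.1 0))).foldl max
            (min (r0.2 + 1) (count.getD r0.1 0)) := by
    intro r hr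
    rcases List.mem_cons.mp hr with rfl | hr'
    · exact foldlMax_infl _ _
    · exact le_foldlMax_of_mem (List.mem_map_of_mem hr') _
  have hRES0 : (0 : Int)
      ≤ (rt.map (fun p => min (p.2 + 1) (count.getD p.1 0))).foldl max
          (min (r0.2 + 1) (count.getD r0.1 0)) := by
    refine le_trans ?_ (hrun_le_RES r0 (by simp))
    have h1 : 1 ≤ r0.2 := hposr r0 (by simp)
    have h2 := hcnt0 r0.1
    omega
  have hRA_run : ∀ (ch : Char) (k : Int), (ch, k) ∈ r0 :: rt →
      min (k + 1) (count.getD ch 0)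
        ≤ (z3 (r0 :: rt)).foldl (Aloopstep count)
            ((rt.map (fun p => min (p.2 + 1) (count.getD p.1 0))).foldl max
              (min (r0.2 + 1) (count.getD r0.1 0))) := by
    intro ch k hk
    exact le_trans (hrun_le_RES (ch, k) hk) (foldl_infl _ inflA _ _)
  have hRA_trip : ∀ (ch : Char) (k1 : Int) (e : Char) (k3 : Int),
      (((ch, k1), (e, 1)), (ch, k3)) ∈ z3 (r0 :: rt) →
      min (k1 + k3 + 1) (count.getD ch 0)
        ≤ (z3 (r0 :: rt)).foldl (Aloopstep count)
            ((rt.map (fun p => min (p.2 + 1) (count.getD p.1 0))).foldl max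
              (min (r0.2 + 1) (count.getD r0.1 0))) := by
    intro ch k1 e k3 hw
    refine foldl_ge_of_mem (Aloopstep count) inflA _ _ ?_ _ _ hw
    intro b
    have h : Aloopstep count b (((ch, k1), (e, 1)), (ch, k3))
        = max b (min (k1 + k3 + 1) (count.getD ch 0)) := by
      simp [Aloopstep]
    rw [h]
    exact le_max_right _ _
  have hG_infl : ∀ (b : Int) (c : Char),
      b ≤ (cands (count.getD c 0) c (r0 :: rt) (0, 0, false)).foldl max b :=
    fun b c => foldlMax_infl _ _
  have hcand_le_RB : ∀ (ch : Char) (y : Int), ch ∈ count.keys →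
      y ∈ cands (count.getD ch 0) ch (r0 :: rt) (0, 0, false) →
      y ≤ count.keys.foldl
            (fun best c => (cands (count.getD c 0) c (r0 :: rt) (0, 0, false)).foldl max best) 0 := by
    intro ch y hch hy
    exact foldl_ge_of_mem _ hG_infl y ch (fun b => le_foldlMax_of_mem hy b) _ _ hch
  have hfr_le_RB : ∀ r ∈ r0 :: rt,
      min (r.2 + 1) (count.getD r.1 0)
        ≤ count.keys.foldl
            (fun best c => (cands (count.getD c 0) c (r0 :: rt) (0, 0, false)).foldl max best) 0 := by
    intro r hr
    obtain ⟨d, k⟩ := r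
    obtain ⟨y, hy, hle⟩ := exists_cand_run (count.getD d 0) d (r0 :: rt) 0 0 false
      le_rfl le_rfl hposr k hr
    exact le_trans hle (hcand_le_RB d y (hkeys (d, k) hr) hy)
  apply le_antisymm
  · refine foldl_le (Aloopstep count) _ _ ?_ _ ?_
    · intro b w hw hb
      unfold Aloopstep
      split_ifs with hcond
      · refine max_le hb ?_
        obtain ⟨⟨⟨d, k1⟩, ⟨e, m⟩⟩, ⟨d2, k3⟩⟩ := w
        obtain ⟨hc1, hc2⟩ := (Bool.and_eq_true ..).mp hcond
        have hd : d = d2 := eq_of_beq hc1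
        have hm : m = 1 := eq_of_beq hc2
        subst hd hm
        obtain ⟨y, hy, hle⟩ := exists_cand_trip (count.getD d 0) d (r0 :: rt) 0 0 false
          le_rfl le_rfl hposr hchain k1 e k3 hw
        have hd1 : (d, k1) ∈ r0 :: rt := by
          simp only [z3] at hw
          exact (List.of_mem_zip (List.of_mem_zip hw).1).1
        exact le_trans hle (hcand_le_RB d y (hkeys (d, k1) hd1) hy)
      · exact hb
    · refine foldl_le max _ _ ?_ _ (hfr_le_RB r0 (by simp))
      intro b x hx hb
      refine max_le hb ?_
      obtain ⟨r, hr', rfl⟩ := List.mem_map.mp hx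
      exact hfr_le_RB r (List.mem_cons_of_mem _ hr')
  · refine foldl_le _ _ _ ?_ 0 (le_trans hRES0 (foldl_infl _ inflA _ _))
    intro b ch hch hb
    refine foldl_le max _ _ ?_ b hb
    intro b' x hx hb'
    refine max_le hb' ?_
    refine cands_bound (count.getD ch 0) ch _ (r0 :: rt)
      (fun k hk => hRA_run ch k hk)
      (fun k1 e k3 h => hRA_trip ch k1 e k3 h)
      hposr hchain (r0 :: rt) (List.suffix_refl _) 0 0 false le_rfl le_rfl ?_ ?_ x hx
    · intro k t' heq
      refine ⟨rfl, ?_⟩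
      have := hRA_run ch k (by rw [heq]; simp)
      simpa using this
    · intro _ _ _ _ _ hfa
      exact absurd hfa (by simp)

-- ===== VERDICT (by name: the statement is the Claim_ definition above) =====
theorem maxRepOpt1_spec : Claim_equal_maxRepOpt1 := by
  intro text _ hpre
  unfold Spec_maxRepOpt1
  have hcs : text.toList ≠ [] := by simpa using hpre
  obtain ⟨c0, rest, hcseq⟩ : ∃ c0 rest, text.toList = c0 :: rest := by
    match h : text.toList with
    | [] => exact absurd h hcs
    | c :: r => exact ⟨c, r, rfl⟩
  obtain ⟨r0, rt, hrs⟩ : ∃ r0 rt, runsA text.toList = r0 :: rt := by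
    rw [hcseq, runsA]
    exact ⟨_, _, rfl⟩
  simp only [maxRepOpt1, maxRepOpt1_alt]
  rw [loops_eq]
  have hscan : (fun (best : Int) (c : Char) =>
        ((text.toList).foldl (innerStep ((PySem.Dict.counter text.toList).getD c 0) c) (0, 0, false, best)).2.2.2)
      = fun (best : Int) (c : Char) =>
        (cands ((PySem.Dict.counter text.toList).getD c 0) c (runsA text.toList) (0, 0, false)).foldl max best := by
    funext best c
    rw [scan_runs, runfold_best]
  rw [hscan]
  have hposr : ∀ r ∈ runsA text.toList, 1 ≤ r.2 := fun r hr => (runsA_mem _ r hr).1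
  have hkeys : ∀ r ∈ runsA text.toList, r.1 ∈ (PySem.Dict.counter text.toList).keys := by
    intro r hr
    rw [PySem.Dict.keys_counter]
    simpa [PySem.Set.mem_ofList] using (runsA_mem _ r hr).2
  have hcnt0 : ∀ ch : Char, 0 ≤ (PySem.Dict.counter text.toList).getD ch 0 := by
    intro ch
    rw [PySem.Dict.getD_counter]
    positivity
  have hchain := runsA_chain text.toList
  rw [hrs] at hposr hkeys hchain ⊢
  exact AB_eq (PySem.Dict.counter text.toList) r0 rt hposr hkeys hcnt0 hchain
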